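-- pv_equiv track=rewrite | github.com/AntonioL/factorized-incremental-maintenance | Exam/FactorizedRepresentation_ArbitraryAcyclicJoins.py | TreeLayout
-- ===== SOURCE A (Python) =====
-- from collections import Counter, defaultdict
--
-- def TreeLayout(rel_attributes, jattributes):
--     already_processed = set()
--     fields = defaultdict(set)
--     penalty = Counter()
--     #Sort the attributes in descending order by the number of relations in which they are involved
--     occurences = Counter([attr for rel in rel_attributes for attr in rel if attr in jattributes])
--     order_of_attributes = sorted(occurences, key=occurences.get, reverse = True)
--     #For each attribute
--     for attr in order_of_attributes:
--         for rel in rel_attributes: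
--             if attr not in rel:
--                 continue
--             #For each relation containing the attribute "attr"
--             #Obtain the name of the other attribute
--             o_attr = rel[0] if rel[0] != attr else rel[1]
--             #Check if it has not already been attached in the factorization-tree
--             if o_attr not in already_processed:
--                 #Check if the other attribute is a joining attribute
--                 #and if it has not already been attached. If it has already been that it means that
--                 #the other attribute has attached the current attribute
--                 if o_attr in jattributes and o_attr not in penalty:
--                     #Update the layout of the factorization tree by attacching
--                     #other attribute as child of the current attribute
--                     fields[attr].add(o_attr)
--                     #Penalize the other attribute by penalty of the current attribute plus one
--                     penalty.update({o_attr : penalty[attr] +1})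
--                     already_processed.add(attr)
--                 elif o_attr not in jattributes:
--                     #otherwise it is not a joining attribute and we can attach it freely!
--                     fields[attr].add(o_attr)
--     #fields gives us the layout of the factorization tree
--     #penalty gives us the order of the joining attributes (they are sorted by the height in the factorization-tree)
--     return fields, penalty
-- ===== SOURCE B (Python) =====
-- from collections import Counter, defaultdict
--
-- def TreeLayout(rel_attributes, jattributes):
--     already_processed = set()
--     fields = defaultdict(set)
--     penalty = Counter()
--     jset = set(jattributes)
--     occurences = Counter(attr for rel in rel_attributes for attr in rel if attr in jset)
--     # One pass: index each attribute to the relations containing it (original order).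
--     index = defaultdict(list)
--     for rel in rel_attributes:
--         for a in dict.fromkeys(rel):
--             index[a].append(rel)
--     for attr in sorted(occurences, key=occurences.get, reverse=True):
--         for rel in index[attr]:
--             o_attr = rel[0] if rel[0] != attr else rel[1]
--             if o_attr not in already_processed:
--                 if o_attr in jset and o_attr not in penalty:
--                     fields[attr].add(o_attr)
--                     penalty.update({o_attr: penalty[attr] + 1})
--                     already_processed.add(attr)
--                 elif o_attr not in jset:
--                     fields[attr].add(o_attr)
--     return fields, penalty
-- ===== Notes on version B (the rewrite author's own statement) =====
-- stated objective: faster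
-- what changed: B builds a one-pass attribute-to-relations index and, for each attribute in the penalty order, iterates only the relations containing it, instead of A's rescan of the whole relation list for every attribute (loop body unchanged).
import Mathlib
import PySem

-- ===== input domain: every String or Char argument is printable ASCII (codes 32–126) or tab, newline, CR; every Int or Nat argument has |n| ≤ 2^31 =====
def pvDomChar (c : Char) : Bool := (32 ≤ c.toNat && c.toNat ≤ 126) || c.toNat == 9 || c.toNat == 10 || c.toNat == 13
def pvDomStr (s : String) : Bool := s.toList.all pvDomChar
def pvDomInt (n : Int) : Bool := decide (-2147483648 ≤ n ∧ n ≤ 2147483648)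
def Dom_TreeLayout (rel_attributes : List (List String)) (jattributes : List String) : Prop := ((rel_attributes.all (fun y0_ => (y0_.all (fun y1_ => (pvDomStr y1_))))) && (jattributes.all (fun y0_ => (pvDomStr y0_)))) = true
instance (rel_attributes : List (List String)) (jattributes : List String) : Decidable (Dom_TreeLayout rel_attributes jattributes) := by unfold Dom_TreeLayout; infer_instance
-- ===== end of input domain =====

-- B indexes relations by attribute in ONE pass and then visits only index[attr], instead of
-- A's rescan of all relations for every attribute; loop body is the same, hence equal results.

-- Shared loop body: both Pythons run literally this body on each (attr, rel) pair.
def TLstep (jattributes : List String) (attr : String)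
    (st : PySem.Set String × PySem.Dict String (PySem.Set String) × PySem.Dict String Int)
    (rel : List String) :
    PySem.Set String × PySem.Dict String (PySem.Set String) × PySem.Dict String Int :=
  let ap := st.1
  let fields := st.2.1
  let pen := st.2.2
  let r0 := PySem.List.pyGetD rel 0 ""   -- rel[0]; total form, exact under Pre_ (see Pre_TreeLayout)
  let o := if r0 != attr then r0 else PySem.List.pyGetD rel 1 ""   -- rel[1]
  if !(PySem.Set.contains ap o) then
    if jattributes.contains o && !(PySem.Dict.contains pen o) then
      (PySem.Set.add ap attr,
       PySem.Dict.modify fields attr PySem.Set.empty (fun s => PySem.Set.add s o),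
       PySem.Dict.insert pen o (PySem.Dict.getD pen attr 0 + 1))
    else if !(jattributes.contains o) then
      (ap, PySem.Dict.modify fields attr PySem.Set.empty (fun s => PySem.Set.add s o), pen)
    else st
  else st

-- ===== PORT A =====
def TreeLayout (rel_attributes : List (List String)) (jattributes : List String) : (List (String × List String)) × (List (String × Int)) :=
  let occurences := PySem.Dict.counter
    (rel_attributes.flatMap (fun rel => rel.filter (fun a => jattributes.contains a)))
  let order := PySem.List.sorted (PySem.Dict.keys occurences)
    (fun k => PySem.Dict.getD occurences k 0) true
  let fin := order.foldl (fun st attr =>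
      rel_attributes.foldl (fun st rel =>
        if rel.contains attr then TLstep jattributes attr st rel else st) st)
    (PySem.Set.empty, PySem.Dict.empty, PySem.Dict.empty)
  (PySem.Dict.items fin.2.1, PySem.Dict.items fin.2.2)

-- ===== PORT B =====
def TreeLayout_alt (rel_attributes : List (List String)) (jattributes : List String) : (List (String × List String)) × (List (String × Int)) :=
  -- jset = set(jattributes): its distinct-element list; 'x in jset' = membership in that list
  let jset := PySem.Set.ofList jattributes
  let occurences := PySem.Dict.counter
    (rel_attributes.flatMap (fun rel => rel.filter (fun a => jset.contains a)))
  -- index[a] = relations containing a, built once (dict.fromkeys = PySem.List.dedup)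
  let index := rel_attributes.foldl (fun d rel =>
      (PySem.List.dedup rel).foldl (fun d a => PySem.Dict.modify d a [] (fun l => l ++ [rel])) d)
    (PySem.Dict.empty : PySem.Dict String (List (List String)))
  let fin := (PySem.List.sorted (PySem.Dict.keys occurences)
      (fun k => PySem.Dict.getD occurences k 0) true).foldl (fun st attr =>
      (PySem.Dict.getD index attr []).foldl (TLstep jset attr) st)
    (PySem.Set.empty, PySem.Dict.empty, PySem.Dict.empty)
  (PySem.Dict.items fin.2.1, PySem.Dict.items fin.2.2)

-- ===== PRECONDITION & SPEC =====
-- Pre_ excludes exactly the inputs on which A raises IndexError: a singleton relation [x]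
-- whose only attribute x is a joining attribute (A then evaluates rel[1]).
def Pre_TreeLayout (rel_attributes : List (List String)) (jattributes : List String) : Prop :=
  (rel_attributes.all (fun rel => match rel with
    | [x] => !(jattributes.contains x)
    | _ => true)) = true
instance (rel_attributes : List (List String)) (jattributes : List String) : Decidable (Pre_TreeLayout rel_attributes jattributes) := by unfold Pre_TreeLayout; infer_instance

def pvWitness_TreeLayout : List (List String) × List String := ([["a", "b"], ["b", "c"]], ["b"])

def Spec_TreeLayout (rel_attributes : List (List String)) (jattributes : List String) (out : (List (String × List String)) × (List (String × Int))) : Prop := out = TreeLayout_alt rel_attributes jattributes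
instance (rel_attributes : List (List String)) (jattributes : List String) (out : (List (String × List String)) × (List (String × Int))) : Decidable (Spec_TreeLayout rel_attributes jattributes out) := by unfold Spec_TreeLayout; infer_instance

-- ===== CLAIM (what is proved, stated in full; the proofs are below) =====
def Claim_equal_TreeLayout : Prop := ∀ (rel_attributes : List (List String)) (jattributes : List String), Dom_TreeLayout rel_attributes jattributes → Pre_TreeLayout rel_attributes jattributes → Spec_TreeLayout rel_attributes jattributes (TreeLayout rel_attributes jattributes)

-- ===== LEMMAS AND PROOFS =====

-- dedup rel keeps attr exactly once iff rel contains it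
lemma dedup_filter_beq (attr : String) (rel : List String) :
    (PySem.List.dedup rel).filter (fun a => a == attr) =
      if rel.contains attr then [attr] else [] := by
  rw [List.filter_beq]
  by_cases h : attr ∈ rel
  · simp [h]
  · simp [List.count_eq_zero, h]

-- one relation's contribution to the index
lemma idx_inner (attr : String) (rel : List String)
    (d : PySem.Dict String (List (List String))) :
    PySem.Dict.getD ((PySem.List.dedup rel).foldl
        (fun d a => PySem.Dict.modify d a [] (fun l => l ++ [rel])) d) attr [] =
      PySem.Dict.getD d attr [] ++ (if rel.contains attr then [rel] else []) := by
  have h1 : (PySem.List.dedup rel).foldl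
      (fun d a => PySem.Dict.modify d a [] (fun l => l ++ [rel])) d
      = ((PySem.List.dedup rel).map (fun a => (a, rel))).foldl
          (fun d p => PySem.Dict.modify d p.1 [] (fun l => l ++ [p.2])) d := by
    rw [List.foldl_map]
  rw [h1, PySem.Dict.getD_foldl_modify_append]
  have h2 : ((PySem.List.dedup rel).map (fun a => (a, rel))).filter (fun p => p.1 == attr)
      = ((PySem.List.dedup rel).filter (fun a => a == attr)).map (fun a => (a, rel)) := by
    rw [List.filter_map]
    rfl
  rw [h2, dedup_filter_beq]
  by_cases h : attr ∈ rel <;> simp [h]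

-- the index lists exactly the relations containing attr, in the original order
lemma idx_getD (attr : String) (rels : List (List String)) :
    ∀ d : PySem.Dict String (List (List String)),
      PySem.Dict.getD (rels.foldl (fun d rel =>
          (PySem.List.dedup rel).foldl
            (fun d a => PySem.Dict.modify d a [] (fun l => l ++ [rel])) d) d) attr [] =
        PySem.Dict.getD d attr [] ++ rels.filter (fun rel => rel.contains attr) := by
  induction rels with
  | nil => intro d; simp
  | cons rel rest ih =>
    intro d
    rw [List.foldl_cons, ih, idx_inner]
    by_cases h : attr ∈ rel <;> simp [h]

-- ===== VERDICT (by name: the statement is the Claim_ definition above) =====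
theorem TreeLayout_spec : Claim_equal_TreeLayout := by
  intro rel_attributes jattributes _ _
  unfold Spec_TreeLayout TreeLayout TreeLayout_alt
  have hco : ∀ a : String, List.contains (PySem.Set.ofList jattributes) a = jattributes.contains a := by
    intro a; simp
  have hco2 : ∀ a : String, PySem.Set.contains (PySem.Set.ofList jattributes) a = jattributes.contains a := by
    intro a; simp
  have hstep : TLstep (PySem.Set.ofList jattributes) = TLstep jattributes := by
    funext attr st rel
    unfold TLstep
    simp only [hco]
  have hinner : ∀ (st : PySem.Set String × PySem.Dict String (PySem.Set String) × PySem.Dict String Int)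
      (attr : String),
      rel_attributes.foldl (fun st rel =>
        if rel.contains attr then TLstep jattributes attr st rel else st) st
      = (PySem.Dict.getD (rel_attributes.foldl (fun d rel =>
          (PySem.List.dedup rel).foldl
            (fun d a => PySem.Dict.modify d a [] (fun l => l ++ [rel])) d)
          (PySem.Dict.empty : PySem.Dict String (List (List String)))) attr []).foldl
          (TLstep jattributes attr) st := by
    intro st attr
    rw [idx_getD, PySem.Dict.getD_empty, List.nil_append,
      PySem.List.foldl_if_eq_foldl_filter]
  simp only [hinner, hco2, hstep]
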